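-- pv_equiv track=rewrite | github.com/kains675/UPDD | utils/run_restrained_md.py | _are_mappings_forcefield_equivalent
-- ===== SOURCE A (Python) =====
-- def _mapping_ff_signature(mapping, tmpl_name_to_type):
--     """단일 graph isomorphism 매핑을 {target_atom_index: xml_atom_type} 서명으로 변환한다.
--
--     Graph isomorphism 이 반환하는 mapping 은 {template_atom_name: target_atom_index}
--     형식이다. AMBER ForceField 는 residue template 의 Atom 원소별 ``type``
--     속성으로 질량/전하/LJ 파라미터를 주입하므로, 매핑의 물리적 의미는 "어떤
--     target 원자에 어떤 XML atom type 이 할당되는가" 로 환원된다.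
--     """
--     return {
--         tgt_idx: tmpl_name_to_type.get(tmpl_name)
--         for tmpl_name, tgt_idx in mapping.items()
--     }
--
-- def _are_mappings_forcefield_equivalent(mappings, tmpl_name_to_type):
--     """다수 매핑이 동일한 force field 파라미터를 산출하는지 검증한다.
--
--     대칭 동등 원자(homotopic atoms — 예: 메틸기의 HB1/HB2/HB3 세 수소) 의
--     순열은 동일 XML atom type 을 공유하므로, 어느 매핑을 선택해도 AMBER
--     residue template 이 target 원자에 부여하는 atom type 이 완전히 동일하다.
--     본 함수는 각 매핑의 (target_idx → xml_type) 서명을 dict 비교로 검증하여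
--     이 조건을 확인한다. 휴리스틱(3! 거듭제곱 패턴 등) 에 의존하지 않고
--     물리적 파라미터 동등성을 직접 증명한다 (Principle 4: Fail-Fast over
--     Silent-Fallback — 동등하지 않으면 즉시 False 반환).
--
--     Returns:
--         bool: 모든 매핑이 동일 FF 서명을 가지면 True.
--     """
--     if len(mappings) <= 1:
--         return True
--     reference = _mapping_ff_signature(mappings[0], tmpl_name_to_type)
--     for m in mappings[1:]:
--         if _mapping_ff_signature(m, tmpl_name_to_type) != reference:
--             return False
--     return True
-- ===== SOURCE B (Python) =====
-- def _mapping_ff_signature(mapping, tmpl_name_to_type):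
--     return {
--         tgt_idx: tmpl_name_to_type.get(tmpl_name)
--         for tmpl_name, tgt_idx in mapping.items()
--     }
--
-- def _are_mappings_forcefield_equivalent(mappings, tmpl_name_to_type):
--     signatures = {
--         frozenset(_mapping_ff_signature(m, tmpl_name_to_type).items())
--         for m in mappings
--     }
--     return len(signatures) <= 1
-- ===== Notes on version B (the rewrite author's own statement) =====
-- stated objective: simpler
-- what changed: Replaces the reference-plus-early-exit comparison loop (with its len<=1 guard) by collecting each mapping's frozenset'd force-field signature into a set and returning whether it holds at most one distinct signature.
import Mathlib
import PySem

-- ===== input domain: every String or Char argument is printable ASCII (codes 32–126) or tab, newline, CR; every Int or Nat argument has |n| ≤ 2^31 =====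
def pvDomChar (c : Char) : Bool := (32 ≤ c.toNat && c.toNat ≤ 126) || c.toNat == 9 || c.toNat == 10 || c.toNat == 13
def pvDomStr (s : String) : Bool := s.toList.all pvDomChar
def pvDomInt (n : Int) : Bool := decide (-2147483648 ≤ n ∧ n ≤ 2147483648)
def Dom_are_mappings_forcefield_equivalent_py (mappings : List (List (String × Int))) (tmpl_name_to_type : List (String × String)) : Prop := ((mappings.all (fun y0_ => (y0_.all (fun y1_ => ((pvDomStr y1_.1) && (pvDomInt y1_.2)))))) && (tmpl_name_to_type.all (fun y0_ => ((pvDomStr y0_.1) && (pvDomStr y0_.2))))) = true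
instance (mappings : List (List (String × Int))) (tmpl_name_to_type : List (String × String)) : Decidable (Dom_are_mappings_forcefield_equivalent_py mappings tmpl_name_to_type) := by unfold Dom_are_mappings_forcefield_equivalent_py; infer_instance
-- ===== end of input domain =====

-- B replaces A's reference/early-exit comparison loop by a set of frozenset'd signatures, returning len(set) ≤ 1 (objective: simpler).

-- shared module-level helper _mapping_ff_signature (used by both A and B in Python):
-- {tgt_idx: tmpl_name_to_type.get(tmpl_name) for tmpl_name, tgt_idx in mapping.items()}
-- (the dict arguments arrive as association lists; Dict.ofList is Python's dict(pairs))
def ffsig (mapping : List (String × Int)) (tmpl_name_to_type : List (String × String)) :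
    PySem.Dict Int (Option String) :=
  let t := PySem.Dict.ofList tmpl_name_to_type
  (PySem.Dict.ofList mapping).items.foldl
    (fun d p => d.insert p.2 (t.get? p.1)) PySem.Dict.empty

-- ===== PORT A =====
-- Python's dict == (order-insensitive key/value equality, exact since dict keys are unique)
def pyDictEq (d1 d2 : PySem.Dict Int (Option String)) : Bool :=
  d1.size == d2.size && d1.items.all (fun p => d2.get? p.1 == some p.2)

-- the 'for m in mappings[1:]' early-exit loop
def loopA (tmpl_name_to_type : List (String × String)) (ref : PySem.Dict Int (Option String)) :
    List (List (String × Int)) → Bool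
  | [] => true
  | m :: ms =>
      if pyDictEq (ffsig m tmpl_name_to_type) ref == false then false
      else loopA tmpl_name_to_type ref ms

def are_mappings_forcefield_equivalent_py (mappings : List (List (String × Int))) (tmpl_name_to_type : List (String × String)) : Bool :=
  if mappings.length ≤ 1 then true
  else
    match mappings with
    | [] => true
    | m0 :: rest => loopA tmpl_name_to_type (ffsig m0 tmpl_name_to_type) rest

-- ===== PORT B =====
-- frozenset(l1) == frozenset(l2); exact for duplicate-free lists (dict .items() lists are)
def fsetEq (l1 l2 : List (Int × Option String)) : Bool :=
  l1.length == l2.length && l1.all (fun p => l2.contains p)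

-- the set of frozenset'd signatures (first-insertion order, membership = frozenset equality)
def are_mappings_forcefield_equivalent_py_alt (mappings : List (List (String × Int))) (tmpl_name_to_type : List (String × String)) : Bool :=
  let signatures := mappings.foldl
    (fun acc m =>
      let s := ffsig m tmpl_name_to_type
      if acc.any (fun d => fsetEq s.items d.items) then acc else acc ++ [s]) []
  decide (signatures.length ≤ 1)

-- ===== PRECONDITION & SPEC =====
def Spec_are_mappings_forcefield_equivalent_py (mappings : List (List (String × Int))) (tmpl_name_to_type : List (String × String)) (out : Bool) : Prop := out = are_mappings_forcefield_equivalent_py_alt mappings tmpl_name_to_type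
instance (mappings : List (List (String × Int))) (tmpl_name_to_type : List (String × String)) (out : Bool) : Decidable (Spec_are_mappings_forcefield_equivalent_py mappings tmpl_name_to_type out) := by unfold Spec_are_mappings_forcefield_equivalent_py; infer_instance

-- ===== CLAIM (what is proved, stated in full; the proofs are below) =====
def Claim_equal_are_mappings_forcefield_equivalent_py : Prop := ∀ (mappings : List (List (String × Int))) (tmpl_name_to_type : List (String × String)), Dom_are_mappings_forcefield_equivalent_py mappings tmpl_name_to_type → Spec_are_mappings_forcefield_equivalent_py mappings tmpl_name_to_type (are_mappings_forcefield_equivalent_py mappings tmpl_name_to_type)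

-- ===== LEMMAS AND PROOFS =====

-- signature dicts have duplicate-free keys
theorem ffsig_nodup_keys (m : List (String × Int)) (t : List (String × String)) :
    (ffsig m t).keys.Nodup :=
  PySem.Dict.nodup_keys_foldl_insert_key (PySem.Dict.ofList m).items (fun p => p.2)
    (fun _ p => (PySem.Dict.ofList t).get? p.1) PySem.Dict.empty PySem.Dict.nodup_keys_empty

-- on dicts with duplicate-free keys, Python's dict == coincides with frozenset equality of items
theorem pyDictEq_eq_fsetEq (d1 d2 : PySem.Dict Int (Option String))
    (h2 : d2.keys.Nodup) : pyDictEq d1 d2 = fsetEq d1.items d2.items := by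
  unfold pyDictEq fsetEq
  have hall : (d1.items.all fun p => d2.get? p.1 == some p.2)
      = d1.items.all fun p => d2.items.contains p := by
    refine Bool.eq_iff_iff.mpr ?_
    simp only [List.all_eq_true, List.contains_eq_mem, beq_iff_eq, decide_eq_true_eq]
    constructor <;> intro h p hp
    · simpa using (PySem.Dict.get?_eq_some_iff_mem_items d2 p.1 p.2 h2).mp (h p hp)
    · exact (PySem.Dict.get?_eq_some_iff_mem_items d2 p.1 p.2 h2).mpr (by simpa using h p hp)
  rw [hall]; rfl

-- the set-building step never shrinks the accumulator
theorem foldl_step_length_mono (t : List (String × String))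
    (l : List (List (String × Int))) (acc : List (PySem.Dict Int (Option String))) :
    acc.length ≤ (l.foldl
      (fun acc m =>
        let s := ffsig m t
        if acc.any (fun d => fsetEq s.items d.items) then acc else acc ++ [s]) acc).length := by
  induction l generalizing acc with
  | nil => simp
  | cons m ms ih =>
      simp only [List.foldl_cons]
      by_cases h : acc.any (fun d => fsetEq (ffsig m t).items d.items) = true
      · simpa [h] using ih acc
      · simp only [h]
        calc acc.length ≤ (acc ++ [ffsig m t]).length := by simp
          _ ≤ _ := by simpa using ih (acc ++ [ffsig m t])

-- A's early-exit loop agrees with B's fold started at the singleton reference accumulator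
theorem loopA_eq_fold (t : List (String × String)) (m0 : List (String × Int))
    (rest : List (List (String × Int))) :
    loopA t (ffsig m0 t) rest =
      decide ((rest.foldl
        (fun acc m =>
          let s := ffsig m t
          if acc.any (fun d => fsetEq s.items d.items) then acc else acc ++ [s])
        [ffsig m0 t]).length ≤ 1) := by
  induction rest with
  | nil => simp [loopA]
  | cons m ms ih =>
      simp only [loopA, List.foldl_cons]
      have hkey := pyDictEq_eq_fsetEq (ffsig m t) (ffsig m0 t) (ffsig_nodup_keys m0 t)
      by_cases h : pyDictEq (ffsig m t) (ffsig m0 t) = true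
      · have hf : fsetEq (ffsig m t).items (ffsig m0 t).items = true := by rw [← hkey]; exact h
        simp [h, hf, ih]
      · have hb : pyDictEq (ffsig m t) (ffsig m0 t) = false := by simpa using h
        have hf : fsetEq (ffsig m t).items (ffsig m0 t).items = false := by rw [← hkey]; exact hb
        have hmono := foldl_step_length_mono t ms [ffsig m0 t, ffsig m t]
        simp only [List.length_cons, List.length_nil] at hmono
        simp only [hb]
        simp only [List.any_cons, List.any_nil, hf, Bool.or_false, if_neg (Bool.false_ne_true),
          List.singleton_append]
        simp only [beq_self_eq_true, if_true, false_eq_decide_iff, not_le]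
        omega

-- ===== VERDICT (by name: the statement is the Claim_ definition above) =====
theorem are_mappings_forcefield_equivalent_py_spec : Claim_equal_are_mappings_forcefield_equivalent_py := by
  intro mappings t _
  unfold Spec_are_mappings_forcefield_equivalent_py
  unfold are_mappings_forcefield_equivalent_py are_mappings_forcefield_equivalent_py_alt
  match mappings with
  | [] => simp
  | [m0] => simp
  | m0 :: m1 :: rest =>
      rw [if_neg (by simp)]
      have h := loopA_eq_fold t m0 (m1 :: rest)
      simp only [List.foldl_cons, List.any_nil, Bool.false_eq_true,
        List.nil_append] at h ⊢
      exact h
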